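-- pv_equiv track=rewrite | github.com/sfepy/sfepy | sfepy/discrete/dg/dg_basis.py | iter_by_order
-- ===== SOURCE A (Python) =====
-- def iter_by_order(order, dim):
--     """
--     Iterates over all combinations of basis functions indexes
--     needed to create multidimensional basis in a way that creates hierarchical basis
--     :param order: desired order of multidimensional basis
--     :param dim: dimension of the basis
--     :yields: tuple containing indexes, use in combine_polyvals and combine_polyvals_der
--     :return: None
--     """
--
--     # nth(iter(map(lambda x: x + (order - reduce(add,x),)), range(order)), dim)
--     # nth(dim, iterate(map(lambda x: x + (order - reduce(add,x),)), map(tuple, range(order))))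
--     # nth(2, iterate(map(lambda x: x + (order - reduce(add,x),)), map(lambda x: (x,), range(order))))
--     porder = order + 1
--     if dim == 1:
--         for i in range(porder):
--             yield (i,)
--         return
--     elif dim == 2:
--         for k in range(porder):
--             for i in range(k + 1):
--                 yield (i, k - i)
--         return
--     elif dim == 3:
--         for k in range(porder):
--             for j in range(k + 1):
--                 for i in range(j + 1):
--                     yield (i, j - i, k - j)
--         return
-- ===== SOURCE B (Python) =====
-- def iter_by_order(order, dim):
--     """Recursive formulation: comps(k, d) yields all d-tuples of
--     non-negative ints summing to k, in hierarchical order."""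
--     def comps(k, d):
--         if d == 1:
--             yield (k,)
--             return
--         for j in range(k + 1):
--             for t in comps(j, d - 1):
--                 yield t + (k - j,)
--
--     if dim not in (1, 2, 3):
--         return
--     for k in range(order + 1):
--         yield from comps(k, dim)
-- ===== Notes on version B (the rewrite author's own statement) =====
-- stated objective: simpler
-- what changed: Replaces the three hard-coded per-dimension nested-loop branches with one recursive generator comps(k, d) over the total-degree recurrence, driven by a single loop over k.
import Mathlib
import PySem

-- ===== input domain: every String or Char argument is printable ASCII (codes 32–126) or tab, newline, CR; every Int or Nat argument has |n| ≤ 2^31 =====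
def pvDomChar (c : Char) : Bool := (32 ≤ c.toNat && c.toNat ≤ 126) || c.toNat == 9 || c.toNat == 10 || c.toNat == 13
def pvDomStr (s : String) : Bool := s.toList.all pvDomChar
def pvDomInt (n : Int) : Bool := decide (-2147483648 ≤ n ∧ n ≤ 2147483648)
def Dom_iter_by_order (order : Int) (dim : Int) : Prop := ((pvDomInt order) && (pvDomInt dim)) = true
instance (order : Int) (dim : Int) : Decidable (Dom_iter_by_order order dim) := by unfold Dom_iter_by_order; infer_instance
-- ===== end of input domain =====

-- B replaces A's three hard-coded per-dimension loop nests with one recursive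
-- generator over the total-degree recurrence (objective: simpler decomposition).

-- ===== PORT A =====
def iter_by_order (order : Int) (dim : Int) : List (List Int) :=
  let porder := order + 1
  if dim = 1 then
    (PySem.List.pyRange 0 porder 1).map (fun i => [i])
  else if dim = 2 then
    (PySem.List.pyRange 0 porder 1).flatMap (fun k =>
      (PySem.List.pyRange 0 (k + 1) 1).map (fun i => [i, k - i]))
  else if dim = 3 then
    (PySem.List.pyRange 0 porder 1).flatMap (fun k =>
      (PySem.List.pyRange 0 (k + 1) 1).flatMap (fun j =>
        (PySem.List.pyRange 0 (j + 1) 1).map (fun i => [i, j - i, k - j])))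
  else []

-- ===== PORT B =====
-- comps k d: all d-tuples of non-negative ints summing to k (d as Nat for recursion;
-- Source B's `d - 1` recursion only ever reaches d ≥ 1).
def pvComps (k : Int) : Nat → List (List Int)
  | 0 => []
  | 1 => [[k]]
  | Nat.succ d =>
    (PySem.List.pyRange 0 (k + 1) 1).flatMap (fun j =>
      (pvComps j d).map (fun t => t ++ [k - j]))

def iter_by_order_alt (order : Int) (dim : Int) : List (List Int) :=
  if dim = 1 ∨ dim = 2 ∨ dim = 3 then
    (PySem.List.pyRange 0 (order + 1) 1).flatMap (fun k => pvComps k dim.toNat)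
  else []

-- ===== PRECONDITION & SPEC =====
def Spec_iter_by_order (order : Int) (dim : Int) (out : List (List Int)) : Prop := out = iter_by_order_alt order dim
instance (order : Int) (dim : Int) (out : List (List Int)) : Decidable (Spec_iter_by_order order dim out) := by unfold Spec_iter_by_order; infer_instance

-- ===== CLAIM (what is proved, stated in full; the proofs are below) =====
def Claim_equal_iter_by_order : Prop := ∀ (order : Int) (dim : Int), Dom_iter_by_order order dim → Spec_iter_by_order order dim (iter_by_order order dim)

-- ===== LEMMAS AND PROOFS =====

theorem pvComps_one (k : Int) : pvComps k 1 = [[k]] := rfl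

theorem flatMap_single {α β : Type} (l : List α) (f : α → β) :
    l.flatMap (fun a => [f a]) = l.map f := by
  induction l with
  | nil => rfl
  | cons a l ih => simp [List.flatMap_cons, ih]

theorem pvComps_two (k : Int) :
    pvComps k 2 = (PySem.List.pyRange 0 (k + 1) 1).map (fun i => [i, k - i]) := by
  show (PySem.List.pyRange 0 (k + 1) 1).flatMap
      (fun j => (pvComps j 1).map (fun t => t ++ [k - j])) = _
  simp only [pvComps_one, List.map_cons, List.map_nil, List.cons_append, List.nil_append]
  exact flatMap_single _ _

theorem pvComps_three (k : Int) :
    pvComps k 3 = (PySem.List.pyRange 0 (k + 1) 1).flatMap (fun j =>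
      (PySem.List.pyRange 0 (j + 1) 1).map (fun i => [i, j - i, k - j])) := by
  show (PySem.List.pyRange 0 (k + 1) 1).flatMap
      (fun j => (pvComps j 2).map (fun t => t ++ [k - j])) = _
  refine List.flatMap_congr (fun j _ => ?_)
  rw [pvComps_two, List.map_map]
  rfl

-- ===== VERDICT (by name: the statement is the Claim_ definition above) =====
theorem iter_by_order_spec : Claim_equal_iter_by_order := by
  intro order dim _
  unfold Spec_iter_by_order iter_by_order iter_by_order_alt
  by_cases h1 : dim = 1
  · subst h1
    simp only []
    rw [show ((1 : Int)).toNat = 1 from rfl]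
    simp only [pvComps_one]
    exact (flatMap_single _ _).symm
  · by_cases h2 : dim = 2
    · subst h2
      simp only [if_neg (by decide : (2 : Int) ≠ 1)]
      rw [show ((2 : Int)).toNat = 2 from rfl]
      exact (List.flatMap_congr (fun k _ => (pvComps_two k))).symm
    · by_cases h3 : dim = 3
      · subst h3
        simp only [if_neg (by decide : (3 : Int) ≠ 1), if_neg (by decide : (3 : Int) ≠ 2)]
        rw [show ((3 : Int)).toNat = 3 from rfl]
        exact (List.flatMap_congr (fun k _ => (pvComps_three k))).symm
      · simp [h1, h2, h3]
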